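-- pv_equiv track=rewrite | github.com/skgande/python | pythoncoding/com/sunil/functions/check_007_order.py | _check_007_order
-- ===== SOURCE A (Python) =====
-- def _check_007_order(nums):
--     is_first_zero = False
--     is_second_zero = False
--     is_seven = False
--
--     for num in nums:
--         if num == 0:
--             if not is_first_zero:
--                 is_first_zero = True
--             elif not is_second_zero:
--                 is_second_zero = True
--         elif num == 7:
--             if is_first_zero and is_second_zero:
--                 return True
--     return False
-- ===== SOURCE B (Python) =====
-- def _check_007_order(nums):
--     try:
--         first = nums.index(0)
--         second = nums.index(0, first + 1)
--         nums.index(7, second + 1)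
--         return True
--     except ValueError:
--         return False
-- ===== Notes on version B (the rewrite author's own statement) =====
-- stated objective: simpler
-- what changed: Replaces A's one-pass two-flag state machine by three landmark searches with list.index (first zero, second zero, a seven after it), with ValueError meaning False.
import Mathlib
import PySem

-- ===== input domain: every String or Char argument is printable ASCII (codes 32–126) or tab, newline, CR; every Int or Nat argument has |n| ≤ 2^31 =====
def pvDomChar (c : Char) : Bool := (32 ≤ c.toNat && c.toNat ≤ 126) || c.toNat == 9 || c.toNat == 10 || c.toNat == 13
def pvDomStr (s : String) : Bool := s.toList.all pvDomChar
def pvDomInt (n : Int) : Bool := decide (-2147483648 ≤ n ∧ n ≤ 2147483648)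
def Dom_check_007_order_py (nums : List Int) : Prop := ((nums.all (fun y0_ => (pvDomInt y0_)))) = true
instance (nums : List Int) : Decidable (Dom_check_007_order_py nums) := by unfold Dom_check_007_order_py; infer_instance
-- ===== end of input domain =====

-- B replaces A's one-pass two-flag state machine by three list.index landmark searches; objective: simpler.

-- ===== PORT A =====
-- loop over nums carrying the two boolean flags; early return True becomes returning true
def check_007_order_py_loop (l : List Int) (is_first_zero is_second_zero : Bool) : Bool :=
  match l with
  | [] => false
  | num :: rest =>
    if num == 0 then
      if !is_first_zero then check_007_order_py_loop rest true is_second_zero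
      else if !is_second_zero then check_007_order_py_loop rest is_first_zero true
      else check_007_order_py_loop rest is_first_zero is_second_zero
    else if num == 7 then
      if is_first_zero && is_second_zero then true
      else check_007_order_py_loop rest is_first_zero is_second_zero
    else check_007_order_py_loop rest is_first_zero is_second_zero

def check_007_order_py (nums : List Int) : Bool :=
  check_007_order_py_loop nums false false

-- ===== PORT B =====
-- nums.index(v, start) ported step for step: it scans the tail nums.drop start left to
-- right and returns the ABSOLUTE index of the first occurrence (none = ValueError);
-- exact for the in-range starts B uses.
def pyIndexFrom (l : List Int) (v : Int) (base : Nat) : Option Nat :=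
  match l with
  | [] => none
  | x :: rest => if x == v then some base else pyIndexFrom rest v (base + 1)

-- the try-block: three chained index searches; any ValueError gives false
def check_007_order_py_alt (nums : List Int) : Bool :=
  match pyIndexFrom nums 0 0 with
  | none => false
  | some first =>
    match pyIndexFrom (nums.drop (first + 1)) 0 (first + 1) with
    | none => false
    | some second =>
      match pyIndexFrom (nums.drop (second + 1)) 7 (second + 1) with
      | none => false
      | some _ => true

-- ===== PRECONDITION & SPEC =====
def Spec_check_007_order_py (nums : List Int) (out : Bool) : Prop := out = check_007_order_py_alt nums
instance (nums : List Int) (out : Bool) : Decidable (Spec_check_007_order_py nums out) := by unfold Spec_check_007_order_py; infer_instance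

-- ===== CLAIM (what is proved, stated in full; the proofs are below) =====
def Claim_equal_check_007_order_py : Prop := ∀ (nums : List Int), Dom_check_007_order_py nums → Spec_check_007_order_py nums (check_007_order_py nums)

-- ===== LEMMAS AND PROOFS =====

-- proof-side reformulations of B with base 0 searches
def g2 (l : List Int) : Bool :=
  match pyIndexFrom l 0 0 with
  | none => false
  | some j => (l.drop (j + 1)).contains 7

def g1 (l : List Int) : Bool :=
  match pyIndexFrom l 0 0 with
  | none => false
  | some i => g2 (l.drop (i + 1))

theorem pyIndexFrom_base (l : List Int) (v : Int) (b : Nat) :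
    pyIndexFrom l v b = (pyIndexFrom l v 0).map (fun k => k + b) := by
  induction l generalizing b with
  | nil => simp [pyIndexFrom]
  | cons x rest ih =>
    by_cases h : x = v
    · simp [pyIndexFrom, h]
    · simp [pyIndexFrom, h, ih (b + 1), ih 1]
      cases pyIndexFrom rest v 0
      · simp
      · simp; omega

theorem pyIndexFrom_isSome (l : List Int) (v : Int) (b : Nat) :
    (pyIndexFrom l v b).isSome = l.contains v := by
  induction l generalizing b with
  | nil => simp [pyIndexFrom]
  | cons x rest ih =>
    by_cases h : x = v
    · simp [pyIndexFrom, h]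
    · simp [pyIndexFrom, h, ih (b + 1)]
      exact fun hvx => absurd hvx.symm h

theorem alt_eq_g1 (nums : List Int) : check_007_order_py_alt nums = g1 nums := by
  unfold check_007_order_py_alt g1
  cases h1 : pyIndexFrom nums 0 0 with
  | none => rfl
  | some i =>
    dsimp only
    unfold g2
    rw [pyIndexFrom_base (nums.drop (i + 1)) 0 (i + 1)]
    cases h2 : pyIndexFrom (nums.drop (i + 1)) 0 0 with
    | none => rfl
    | some j =>
      simp only [Option.map_some]
      have hdrop : nums.drop (j + (i + 1) + 1) = (nums.drop (i + 1)).drop (j + 1) := by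
        rw [List.drop_drop]; ring_nf
      rw [hdrop]
      cases h3 : pyIndexFrom ((nums.drop (i + 1)).drop (j + 1)) 7 (j + (i + 1) + 1) with
      | none =>
        have := pyIndexFrom_isSome ((nums.drop (i + 1)).drop (j + 1)) 7 (j + (i + 1) + 1)
        rw [h3] at this
        simp at this
        simp [this]
      | some k =>
        have := pyIndexFrom_isSome ((nums.drop (i + 1)).drop (j + 1)) 7 (j + (i + 1) + 1)
        rw [h3] at this
        simp at this
        simp [this]

-- A's loop with both flags set is a membership test for 7
theorem aLoop_true_true (l : List Int) :
    check_007_order_py_loop l true true = l.contains 7 := by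
  induction l with
  | nil => simp [check_007_order_py_loop]
  | cons n rest ih =>
    by_cases h0 : n = 0
    · subst h0; simp [check_007_order_py_loop, ih]
    · by_cases h7 : n = 7
      · subst h7; simp [check_007_order_py_loop]
      · simp [check_007_order_py_loop, h0, h7, ih]
        exact fun h => absurd h.symm h7

theorem g2_shift (n : Int) (rest : List Int) (h : n ≠ 0) :
    g2 (n :: rest) = g2 rest := by
  unfold g2
  simp only [pyIndexFrom, pyIndexFrom_base rest 0 1]
  cases h2 : pyIndexFrom rest 0 0 with
  | none => simp [h]
  | some j => simp [h, List.drop_succ_cons]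

theorem g1_shift (n : Int) (rest : List Int) (h : n ≠ 0) :
    g1 (n :: rest) = g1 rest := by
  unfold g1
  simp only [pyIndexFrom, pyIndexFrom_base rest 0 1]
  cases h2 : pyIndexFrom rest 0 0 with
  | none => simp [h]
  | some j => simp [h, List.drop_succ_cons]

-- A's loop with one flag set is g2
theorem aLoop_true_false (l : List Int) :
    check_007_order_py_loop l true false = g2 l := by
  induction l with
  | nil => simp [check_007_order_py_loop, g2, pyIndexFrom]
  | cons n rest ih =>
    by_cases h0 : n = 0
    · subst h0
      simp [check_007_order_py_loop, g2, pyIndexFrom, aLoop_true_true]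
    · by_cases h7 : n = 7
      · subst h7
        simp [check_007_order_py_loop, ih, g2_shift (7 : Int) rest (by norm_num)]
      · simp [check_007_order_py_loop, h0, h7, ih, g2_shift n rest h0]

-- A's loop with no flag set is g1
theorem aLoop_false_false (l : List Int) :
    check_007_order_py_loop l false false = g1 l := by
  induction l with
  | nil => simp [check_007_order_py_loop, g1, pyIndexFrom]
  | cons n rest ih =>
    by_cases h0 : n = 0
    · subst h0
      simp [check_007_order_py_loop, g1, pyIndexFrom, aLoop_true_false]
    · by_cases h7 : n = 7
      · subst h7
        simp [check_007_order_py_loop, ih, g1_shift (7 : Int) rest (by norm_num)]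
      · simp [check_007_order_py_loop, h0, h7, ih, g1_shift n rest h0]

-- ===== VERDICT (by name: the statement is the Claim_ definition above) =====
theorem check_007_order_py_spec : Claim_equal_check_007_order_py := by
  intro nums _
  unfold Spec_check_007_order_py check_007_order_py
  rw [alt_eq_g1, aLoop_false_false]
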